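-- pv_equiv track=rewrite | github.com/manuchehrqoriev798/Final-DAA-Project | main.py | compute_complement_graph
-- ===== SOURCE A (Python) =====
-- def compute_complement_graph(edges, vertices):
--     """
--     Compute the complement graph G' of graph G.
--     In the complement graph, an edge exists between two vertices
--     if and only if it does NOT exist in the original graph.
--     """
--     # Create set of original edges for fast lookup
--     original_edges = set()
--     for u, v in edges:
--         if u < v:
--             original_edges.add((u, v))
--         else:
--             original_edges.add((v, u))
--
--     # Generate all possible edges in complete graph
--     vertices_list = sorted(vertices)
--     n = len(vertices_list)
--     complement_edges = []
--
--     # For each pair of vertices, add edge if not in original graph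
--     for i in range(n):
--         for j in range(i + 1, n):
--             u, v = vertices_list[i], vertices_list[j]
--             edge_tuple = (u, v) if u < v else (v, u)
--             if edge_tuple not in original_edges:
--                 complement_edges.append((u, v))
--
--     return complement_edges
-- ===== SOURCE B (Python) =====
-- def compute_complement_graph(edges, vertices):
--     """
--     Compute the complement graph G' of graph G by peeling the sorted vertex
--     list head-by-head: each head u is paired with every later vertex v, and
--     (u, v) is kept unless it is a (normalized) original edge.
--     """
--     banned = {(min(u, v), max(u, v)) for u, v in edges}
--     out = []
--     rest = sorted(vertices)
--     while rest:
--         u, rest = rest[0], rest[1:]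
--         out += [(u, v) for v in rest if (u, v) not in banned]
--     return out
-- ===== Notes on version B (the rewrite author's own statement) =====
-- stated objective: simpler
-- what changed: Replaces A's nested index loops over range(n) with pyGetD-style indexing by head/tail peeling of the sorted vertex list, a list-comprehension filter per head, and a set comprehension with min/max normalization instead of an explicit loop building the edge set.
import Mathlib
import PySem

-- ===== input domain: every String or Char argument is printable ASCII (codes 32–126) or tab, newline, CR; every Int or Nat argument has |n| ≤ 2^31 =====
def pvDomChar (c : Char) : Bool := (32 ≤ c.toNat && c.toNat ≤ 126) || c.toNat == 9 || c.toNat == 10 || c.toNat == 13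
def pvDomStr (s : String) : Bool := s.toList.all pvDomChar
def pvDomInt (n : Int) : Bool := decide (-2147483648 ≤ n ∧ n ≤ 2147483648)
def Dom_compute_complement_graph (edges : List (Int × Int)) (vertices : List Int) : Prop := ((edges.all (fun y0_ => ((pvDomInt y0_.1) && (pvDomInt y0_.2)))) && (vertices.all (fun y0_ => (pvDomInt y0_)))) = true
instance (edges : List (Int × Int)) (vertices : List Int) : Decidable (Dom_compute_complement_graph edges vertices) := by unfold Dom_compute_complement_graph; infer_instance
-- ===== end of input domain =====

-- B peels the sorted vertex list head-by-head (set-comprehension banned set, comprehension filter per head)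
-- instead of A's nested index loops; objective: simpler. Both total; return value only, no mutation.

-- ===== PORT A =====
def compute_complement_graph (edges : List (Int × Int)) (vertices : List Int) : List (Int × Int) :=
  let original_edges : PySem.Set (Int × Int) :=
    edges.foldl (fun s uv =>
      if uv.1 < uv.2 then PySem.Set.add s (uv.1, uv.2) else PySem.Set.add s (uv.2, uv.1))
      PySem.Set.empty
  let vertices_list := PySem.List.sorted vertices (fun x => x) false
  let n : Int := vertices_list.length
  (PySem.List.pyRange 0 n 1).foldl (fun acc i =>
    (PySem.List.pyRange (i + 1) n 1).foldl (fun acc j =>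
      let u := PySem.List.pyGetD vertices_list i 0
      let v := PySem.List.pyGetD vertices_list j 0
      let edge_tuple := if u < v then (u, v) else (v, u)
      if !(PySem.Set.contains original_edges edge_tuple) then acc ++ [(u, v)] else acc) acc) []

-- ===== PORT B =====
-- banned = {(min(u, v), max(u, v)) for u, v in edges}
def cgAltBanned (edges : List (Int × Int)) : PySem.Set (Int × Int) :=
  PySem.Set.ofList (edges.map (fun uv => (min uv.1 uv.2, max uv.1 uv.2)))

-- while rest: u, rest = rest[0], rest[1:]; out += [(u, v) for v in rest if (u, v) not in banned]
def cgAltLoop (banned : PySem.Set (Int × Int)) (out : List (Int × Int)) :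
    List Int → List (Int × Int)
  | [] => out
  | u :: rest =>
      cgAltLoop banned
        (out ++ (rest.filter (fun v => !(PySem.Set.contains banned (u, v)))).map (fun v => (u, v)))
        rest

def compute_complement_graph_alt (edges : List (Int × Int)) (vertices : List Int) : List (Int × Int) :=
  cgAltLoop (cgAltBanned edges) [] (PySem.List.sorted vertices (fun x => x) false)

-- ===== PRECONDITION & SPEC =====
def Spec_compute_complement_graph (edges : List (Int × Int)) (vertices : List Int) (out : List (Int × Int)) : Prop := out = compute_complement_graph_alt edges vertices
instance (edges : List (Int × Int)) (vertices : List Int) (out : List (Int × Int)) : Decidable (Spec_compute_complement_graph edges vertices out) := by unfold Spec_compute_complement_graph; infer_instance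

-- ===== CLAIM (what is proved, stated in full; the proofs are below) =====
def Claim_equal_compute_complement_graph : Prop := ∀ (edges : List (Int × Int)) (vertices : List Int), Dom_compute_complement_graph edges vertices → Spec_compute_complement_graph edges vertices (compute_complement_graph edges vertices)

-- ===== LEMMAS AND PROOFS =====

-- A's edge-set loop builds exactly B's banned set.
theorem cg_banned_eq (edges : List (Int × Int)) :
    edges.foldl (fun s uv =>
      if uv.1 < uv.2 then PySem.Set.add s (uv.1, uv.2) else PySem.Set.add s (uv.2, uv.1))
      PySem.Set.empty = cgAltBanned edges := by
  unfold cgAltBanned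
  rw [PySem.Set.ofList_eq_foldl, List.foldl_map]
  apply PySem.List.foldl_congr_mem
  intro s uv _
  by_cases h : uv.1 < uv.2 <;> simp [h, le_of_lt, le_of_not_gt]

-- The nested index loops of A, over any list vs with nondecreasing entries, equal B's peel loop.
theorem cg_loop_eq (banned : PySem.Set (Int × Int)) (vs : List Int)
    (hs : vs.Pairwise (· ≤ ·)) :
    ∀ acc : List (Int × Int),
      (PySem.List.pyRange 0 (vs.length : Int) 1).foldl (fun acc i =>
        (PySem.List.pyRange (i + 1) (vs.length : Int) 1).foldl (fun acc j =>
          if !(PySem.Set.contains banned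
              (if PySem.List.pyGetD vs i 0 < PySem.List.pyGetD vs j 0 then
                (PySem.List.pyGetD vs i 0, PySem.List.pyGetD vs j 0)
              else (PySem.List.pyGetD vs j 0, PySem.List.pyGetD vs i 0)))
          then acc ++ [(PySem.List.pyGetD vs i 0, PySem.List.pyGetD vs j 0)] else acc) acc) acc
      = cgAltLoop banned acc vs := by
  induction vs with
  | nil => intro acc; simp [PySem.List.pyRange_one_eq_nil, cgAltLoop]
  | cons u rest ih =>
    intro acc
    have h0 : PySem.List.pyGetD (u :: rest) 0 0 = u := by simp [PySem.List.pyGetD]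
    rw [PySem.List.pyRange_one_cons (by simp : (0:Int) < ((u :: rest).length : Int))]
    simp only [List.foldl_cons]
    -- the inner loop at i = 0 appends exactly B's first comprehension
    have hinner :
        (PySem.List.pyRange (0 + 1) ((u :: rest).length : Int) 1).foldl (fun acc j =>
          if !(PySem.Set.contains banned
              (if PySem.List.pyGetD (u :: rest) 0 0 < PySem.List.pyGetD (u :: rest) j 0 then
                (PySem.List.pyGetD (u :: rest) 0 0, PySem.List.pyGetD (u :: rest) j 0)
              else (PySem.List.pyGetD (u :: rest) j 0, PySem.List.pyGetD (u :: rest) 0 0)))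
          then acc ++ [(PySem.List.pyGetD (u :: rest) 0 0, PySem.List.pyGetD (u :: rest) j 0)] else acc) acc
        = acc ++ (rest.filter (fun v => !(PySem.Set.contains banned (u, v)))).map
            (fun v => (u, v)) := by
      rw [show (0:Int) + 1 = 1 by ring]
      rw [PySem.List.foldl_pyRange_pyGetD' (u :: rest) 0
        (fun acc v =>
          if !(PySem.Set.contains banned
              (if PySem.List.pyGetD (u :: rest) 0 0 < v then (PySem.List.pyGetD (u :: rest) 0 0, v)
              else (v, PySem.List.pyGetD (u :: rest) 0 0)))
          then acc ++ [(PySem.List.pyGetD (u :: rest) 0 0, v)] else acc)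
        acc (a := 1) (by omega)]
      simp only [h0, Int.toNat_one, List.drop_one, List.tail_cons]
      rw [PySem.List.foldl_congr_mem rest _
        (fun acc v => if !(PySem.Set.contains banned (u, v)) then acc ++ [(u, v)] else acc) acc ?_]
      · exact PySem.List.foldl_append_if _ _ rest acc
      · intro acc' v hv
        have huv : u ≤ v := (List.pairwise_cons.mp hs).1 v hv
        rcases lt_or_eq_of_le huv with h | h
        · simp [h]
        · subst h; simp
    rw [hinner]
    -- the remaining outer iterations i = 1 .. n reindex to the same loop over rest
    have hshift :
        ∀ acc' : List (Int × Int),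
        (PySem.List.pyRange (0 + 1) ((u :: rest).length : Int) 1).foldl (fun acc i =>
          (PySem.List.pyRange (i + 1) ((u :: rest).length : Int) 1).foldl (fun acc j =>
            if !(PySem.Set.contains banned
                (if PySem.List.pyGetD (u :: rest) i 0 < PySem.List.pyGetD (u :: rest) j 0 then
                  (PySem.List.pyGetD (u :: rest) i 0, PySem.List.pyGetD (u :: rest) j 0)
                else (PySem.List.pyGetD (u :: rest) j 0, PySem.List.pyGetD (u :: rest) i 0)))
            then acc ++ [(PySem.List.pyGetD (u :: rest) i 0, PySem.List.pyGetD (u :: rest) j 0)] else acc) acc) acc'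
        = (PySem.List.pyRange 0 (rest.length : Int) 1).foldl (fun acc i =>
            (PySem.List.pyRange (i + 1) (rest.length : Int) 1).foldl (fun acc j =>
              if !(PySem.Set.contains banned
                  (if PySem.List.pyGetD rest i 0 < PySem.List.pyGetD rest j 0 then
                    (PySem.List.pyGetD rest i 0, PySem.List.pyGetD rest j 0)
                  else (PySem.List.pyGetD rest j 0, PySem.List.pyGetD rest i 0)))
              then acc ++ [(PySem.List.pyGetD rest i 0, PySem.List.pyGetD rest j 0)] else acc) acc) acc' := by
      intro acc'
      rw [show (0:Int) + 1 = 1 by ring]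
      rw [PySem.List.pyRange_one 1, PySem.List.pyRange_one 0, List.foldl_map, List.foldl_map]
      have hl1 : (((u :: rest).length : Int) - 1).toNat = rest.length := by simp
      have hl0 : ((rest.length : Int) - 0).toNat = rest.length := by simp
      rw [hl1, hl0]
      apply PySem.List.foldl_congr_mem
      intro acc'' k _
      have hget : PySem.List.pyGetD (u :: rest) (1 + (k : Int)) 0 = PySem.List.pyGetD rest (0 + (k : Int)) 0 := by
        have h1 : (1 + (k : Int)) = ((k + 1 : Nat) : Int) := by push_cast; ring
        have h2 : (0 + (k : Int)) = ((k : Nat) : Int) := by ring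
        rw [h1, h2, PySem.List.pyGetD_natCast, PySem.List.pyGetD_natCast]
        simp
      rw [hget]
      rw [PySem.List.foldl_pyRange_pyGetD' (u :: rest) 0
        (fun acc v =>
          if !(PySem.Set.contains banned
              (if PySem.List.pyGetD rest (0 + (k : Int)) 0 < v then (PySem.List.pyGetD rest (0 + (k : Int)) 0, v)
              else (v, PySem.List.pyGetD rest (0 + (k : Int)) 0)))
          then acc ++ [(PySem.List.pyGetD rest (0 + (k : Int)) 0, v)] else acc)
        acc'' (a := 1 + (k : Int) + 1) (by omega)]
      rw [PySem.List.foldl_pyRange_pyGetD' rest 0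
        (fun acc v =>
          if !(PySem.Set.contains banned
              (if PySem.List.pyGetD rest (0 + (k : Int)) 0 < v then (PySem.List.pyGetD rest (0 + (k : Int)) 0, v)
              else (v, PySem.List.pyGetD rest (0 + (k : Int)) 0)))
          then acc ++ [(PySem.List.pyGetD rest (0 + (k : Int)) 0, v)] else acc)
        acc'' (a := 0 + (k : Int) + 1) (by omega)]
      have hd : List.drop (1 + (k : Int) + 1).toNat (u :: rest) = List.drop (0 + (k : Int) + 1).toNat rest := by
        have e1 : (1 + (k : Int) + 1).toNat = k + 2 := by omega
        have e2 : (0 + (k : Int) + 1).toNat = k + 1 := by omega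
        rw [e1, e2]; rfl
      rw [hd]
    rw [hshift]
    rw [ih (List.Pairwise.of_cons hs) _]
    rfl

-- ===== VERDICT (by name: the statement is the Claim_ definition above) =====
theorem compute_complement_graph_spec : Claim_equal_compute_complement_graph := by
  intro edges vertices _
  unfold Spec_compute_complement_graph compute_complement_graph compute_complement_graph_alt
  simp only [cg_banned_eq]
  exact cg_loop_eq (cgAltBanned edges) (PySem.List.sorted vertices (fun x => x) false)
    (PySem.List.sorted_pairwise vertices (fun x => x)) []
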